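-- pv_equiv track=rewrite | github.com/tmaxai/hypersp | tasks/SpeechRecognition/ktelspeech/local/cleaners.py | bracket_filter
-- ===== SOURCE A (Python) =====
-- def bracket_filter(sentence, mode='pronounciation'):
--     new_sentence = str()
--
--     if mode == 'pronounciation':
--         flag = False
--
--         for ch in sentence:
--             if ch == '(' and flag is False:
--                 flag = True
--                 continue
--             if ch == '(' and flag is True:
--                 flag = False
--                 continue
--             if ch != ')' and flag is False:
--                 new_sentence += ch
--
--     elif mode == 'spelling':
--         flag = True
--
--         for ch in sentence:
--             if ch == '(':
--                 continue
--             if ch == ')':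
--                 if flag is True:
--                     flag = False
--                     continue
--                 else:
--                     flag = True
--                     continue
--             if ch != ')' and flag is True:
--                 new_sentence += ch
--
--     else:
--         raise ValueError("Unsupported mode : {0}".format(mode))
--
--     return new_sentence
-- ===== SOURCE B (Python) =====
-- def bracket_filter(sentence, mode='pronounciation'):
--     if mode == 'pronounciation':
--         parts = sentence.split('(')
--         return ''.join(parts[i].replace(')', '') for i in range(0, len(parts), 2))
--     elif mode == 'spelling':
--         parts = sentence.split(')')
--         return ''.join(parts[i].replace('(', '') for i in range(0, len(parts), 2))
--     raise ValueError("Unsupported mode : {0}".format(mode))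
-- ===== Notes on version B (the rewrite author's own statement) =====
-- stated objective: idiomatic
-- what changed: B replaces A's character-by-character flag loop with a split/join decomposition: split on the toggling bracket, keep the even-index segments, strip the other bracket from them and join.
import Mathlib
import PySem

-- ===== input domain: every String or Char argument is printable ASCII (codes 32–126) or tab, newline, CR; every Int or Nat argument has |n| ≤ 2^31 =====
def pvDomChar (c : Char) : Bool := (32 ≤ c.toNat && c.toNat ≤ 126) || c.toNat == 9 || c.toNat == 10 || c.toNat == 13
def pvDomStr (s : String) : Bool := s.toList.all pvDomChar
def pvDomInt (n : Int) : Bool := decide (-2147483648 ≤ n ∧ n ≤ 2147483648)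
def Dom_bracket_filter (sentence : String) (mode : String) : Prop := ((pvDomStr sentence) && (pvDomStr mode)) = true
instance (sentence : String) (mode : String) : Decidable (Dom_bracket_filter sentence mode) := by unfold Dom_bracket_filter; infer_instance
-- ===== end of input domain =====

-- B replaces A's per-character flag loop by split on the toggling bracket / keep even segments / strip the other bracket / join; equivalence of return values on both supported modes.

-- ===== PORT A =====
def bracket_filter (sentence : String) (mode : String) : String :=
  if mode == "pronounciation" then
    let r := sentence.toList.foldl (fun (st : Bool × List Char) ch =>
      if ch == '(' && st.1 == false then (true, st.2)
      else if ch == '(' && st.1 == true then (false, st.2)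
      else if ch != ')' && st.1 == false then (st.1, st.2 ++ [ch])
      else st) (false, [])
    String.mk r.2
  else if mode == "spelling" then
    let r := sentence.toList.foldl (fun (st : Bool × List Char) ch =>
      if ch == '(' then st
      else if ch == ')' then (if st.1 == true then (false, st.2) else (true, st.2))
      else if ch != ')' && st.1 == true then (st.1, st.2 ++ [ch])
      else st) (true, [])
    String.mk r.2
  else "" -- Python raises ValueError here; excluded by Pre_bracket_filter

-- ===== PORT B =====
def bracket_filter_alt (sentence : String) (mode : String) : String :=
  if mode == "pronounciation" then
    let parts := PySem.Chars.splitOn sentence.toList ['(']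
    String.mk (PySem.Chars.join []
      ((PySem.List.pyRange 0 parts.length 2).map
        (fun i => PySem.Chars.replace ((PySem.List.pyGet? parts i).getD []) [')'] [])))
  else if mode == "spelling" then
    let parts := PySem.Chars.splitOn sentence.toList [')']
    String.mk (PySem.Chars.join []
      ((PySem.List.pyRange 0 parts.length 2).map
        (fun i => PySem.Chars.replace ((PySem.List.pyGet? parts i).getD []) ['('] [])))
  else "" -- Python raises ValueError here; excluded by Pre_bracket_filter

-- ===== PRECONDITION & SPEC =====
-- A raises ValueError("Unsupported mode : …") for any mode other than these two; B does the same.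
def Pre_bracket_filter (sentence : String) (mode : String) : Prop :=
  mode = "pronounciation" ∨ mode = "spelling"
instance (sentence : String) (mode : String) : Decidable (Pre_bracket_filter sentence mode) := by
  unfold Pre_bracket_filter; infer_instance

def pvWitness_bracket_filter : String × String := ("ab(cd)e(f(g)h)i", "pronounciation")

def Spec_bracket_filter (sentence : String) (mode : String) (out : String) : Prop := out = bracket_filter_alt sentence mode
instance (sentence : String) (mode : String) (out : String) : Decidable (Spec_bracket_filter sentence mode out) := by unfold Spec_bracket_filter; infer_instance

-- ===== CLAIM (what is proved, stated in full; the proofs are below) =====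
def Claim_equal_bracket_filter : Prop := ∀ (sentence : String) (mode : String), Dom_bracket_filter sentence mode → Pre_bracket_filter sentence mode → Spec_bracket_filter sentence mode (bracket_filter sentence mode)

-- ===== LEMMAS AND PROOFS =====

-- the common specification: drop `drop`, suppress while inside a `tog`-delimited span (f = suppressing)
def pvFilt (tog drop : Char) : Bool → List Char → List Char
  | _, [] => []
  | f, d :: t =>
    if d = tog then pvFilt tog drop (!f) t
    else if f = false ∧ d ≠ drop then d :: pvFilt tog drop f t
    else pvFilt tog drop f t

-- split on a single character: head segment and remaining segments
def pvSplitc (c : Char) : List Char → List Char × List (List Char)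
  | [] => ([], [])
  | d :: t =>
    let p := pvSplitc c t
    if d = c then ([], p.1 :: p.2) else (d :: p.1, p.2)

def pvEvens {α : Type} : List α → List α
  | [] => []
  | [x] => [x]
  | x :: _ :: t => x :: pvEvens t

def pvOdds {α : Type} : List α → List α
  | [] => []
  | _ :: t => pvEvens t

theorem pvEvens_cons {α : Type} (x : α) (t : List α) : pvEvens (x :: t) = x :: pvOdds t := by
  cases t <;> simp [pvEvens, pvOdds]

theorem splitOn_go_single (c : Char) (fuel : Nat) (l cur : List Char) (acc : List (List Char))
    (h : l.length ≤ fuel) :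
    PySem.Chars.splitOn.go [c] fuel l cur acc =
      acc.reverse ++ (cur.reverse ++ (pvSplitc c l).1) :: (pvSplitc c l).2 := by
  induction fuel generalizing l cur acc with
  | zero =>
    have : l = [] := by cases l <;> simp_all
    subst this; simp [PySem.Chars.splitOn.go, pvSplitc]
  | succ f ih =>
    cases l with
    | nil => simp [PySem.Chars.splitOn.go, pvSplitc]
    | cons d t =>
      simp only [PySem.Chars.splitOn.go]
      by_cases hd : d = c
      · subst hd
        rw [if_pos (by simp [List.isPrefixOf])]
        rw [ih _ _ _ (by simpa using Nat.le_of_succ_le_succ (by simpa using h))]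
        simp [pvSplitc]
      · rw [if_neg (by simp [List.isPrefixOf]; exact fun hh => hd hh.symm)]
        rw [ih _ _ _ (by simpa using Nat.le_of_succ_le_succ (by simpa using h))]
        simp [pvSplitc, hd]

theorem splitOn_single (c : Char) (s : List Char) :
    PySem.Chars.splitOn s [c] = (pvSplitc c s).1 :: (pvSplitc c s).2 := by
  rw [PySem.Chars.splitOn, splitOn_go_single c (s.length + 1) s [] [] (Nat.le_succ _)]
  simp

theorem replace_go_single (c : Char) (fuel : Nat) (l acc : List Char)
    (h : l.length ≤ fuel) :
    PySem.Chars.replace.go [c] [] fuel l acc = acc.reverse ++ l.filter (fun d => d ≠ c) := by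
  induction fuel generalizing l acc with
  | zero =>
    have : l = [] := by cases l <;> simp_all
    subst this; simp [PySem.Chars.replace.go]
  | succ f ih =>
    cases l with
    | nil => simp [PySem.Chars.replace.go]
    | cons d t =>
      simp only [PySem.Chars.replace.go]
      by_cases hd : d = c
      · subst hd
        rw [if_pos (by simp [List.isPrefixOf])]
        rw [ih _ _ (by simpa using Nat.le_of_succ_le_succ (by simpa using h))]
        simp
      · rw [if_neg (by simp [List.isPrefixOf]; exact fun hh => hd hh.symm)]
        rw [ih _ _ (by simpa using Nat.le_of_succ_le_succ (by simpa using h))]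
        simp [hd]

theorem replace_single (c : Char) (l : List Char) :
    PySem.Chars.replace l [c] [] = l.filter (fun d => d ≠ c) := by
  simp [PySem.Chars.replace, replace_go_single c l.length l [] le_rfl]

theorem join_nil_flatten (xs : List (List Char)) : PySem.Chars.join [] xs = xs.flatten := by
  induction xs with
  | nil => simp [PySem.Chars.join, List.intercalate, List.intersperse]
  | cons a t ih =>
    cases t with
    | nil => simp [PySem.Chars.join, List.intercalate, List.intersperse]
    | cons b r =>
      simp only [PySem.Chars.join, List.intercalate, List.intersperse] at *
      simp_all

theorem pyRange_two (n : Nat) :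
    PySem.List.pyRange 0 (n : Int) 2 = (List.range ((n + 1) / 2)).map (fun k => ((2 * k : Nat) : Int)) := by
  simp only [PySem.List.pyRange]
  norm_num
  rcases Nat.eq_zero_or_pos n with h | h
  · subst h; simp
  · rw [if_pos (by exact_mod_cast h)]
    have h1 : ((n : Int) + 2 - 1) = (((n + 1 : Nat)) : Int) := by push_cast; ring
    have h2 : (((n + 1 : Nat)) : Int) / 2 = (((n + 1) / 2 : Nat) : Int) := by
      exact_mod_cast (Int.natCast_ediv (n + 1) 2).symm
    rw [h1, h2, Int.toNat_natCast]

theorem range_map_evens {α : Type} (parts : List α) (dflt : α) :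
    (List.range ((parts.length + 1) / 2)).map (fun k => parts.getD (2 * k) dflt) = pvEvens parts := by
  induction parts using pvEvens.induct with
  | case1 => simp [pvEvens]
  | case2 x => simp [pvEvens, List.range_succ]
  | case3 x y t ih =>
    have hlen : (List.length (x :: y :: t) + 1) / 2 = (t.length + 1) / 2 + 1 := by
      simp [List.length]; omega
    rw [hlen, List.range_succ_eq_map]
    rw [pvEvens]
    simp only [List.map_cons, List.map_map, Nat.mul_zero, List.getD_cons_zero, List.cons.injEq,
      true_and]
    rw [← ih]
    apply List.map_congr_left
    intro k _
    simp only [Function.comp_apply]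
    have : 2 * (k + 1) = (2 * k) + 2 := by omega
    rw [this]
    simp [List.getD]

-- A's pronounciation-mode fold computes pvFilt '(' ')' from flag=false
theorem foldA_pron (s : List Char) (f : Bool) (acc : List Char) :
    (s.foldl (fun (st : Bool × List Char) ch =>
      if ch == '(' && st.1 == false then (true, st.2)
      else if ch == '(' && st.1 == true then (false, st.2)
      else if ch != ')' && st.1 == false then (st.1, st.2 ++ [ch])
      else st) (f, acc)).2 = acc ++ pvFilt '(' ')' f s := by
  induction s generalizing f acc with
  | nil => simp [pvFilt]
  | cons d t ih =>
    simp only [beq_iff_eq, Bool.and_eq_true, decide_eq_true_eq, bne_iff_ne, ne_eq,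
      Bool.decide_and, Bool.decide_eq_true, decide_not] at ih
    by_cases hd : d = '('
    · subst hd
      cases f <;> simp [pvFilt, ih]
    · by_cases hdr : d = ')'
      · subst hdr
        cases f <;> simp [pvFilt, ih, hd]
      · cases f <;> simp [pvFilt, ih, hd, hdr]

-- A's spelling-mode fold; A's flag=true means "keeping", i.e. pvFilt's f = !flag
theorem foldA_spell (s : List Char) (f : Bool) (acc : List Char) :
    (s.foldl (fun (st : Bool × List Char) ch =>
      if ch == '(' then st
      else if ch == ')' then (if st.1 == true then (false, st.2) else (true, st.2))
      else if ch != ')' && st.1 == true then (st.1, st.2 ++ [ch])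
      else st) (f, acc)).2 = acc ++ pvFilt ')' '(' (!f) s := by
  induction s generalizing f acc with
  | nil => simp [pvFilt]
  | cons d t ih =>
    simp only [beq_iff_eq, Bool.and_eq_true, decide_eq_true_eq, bne_iff_ne, ne_eq,
      Bool.decide_and, Bool.decide_eq_true, decide_not] at ih
    by_cases hd : d = '('
    · subst hd
      cases f <;> simp [pvFilt, ih]
    · by_cases hdr : d = ')'
      · subst hdr
        cases f <;> simp [pvFilt, ih, hd]
      · cases f <;> simp [pvFilt, ih, hd, hdr]

-- B's even-segment join equals pvFilt, both parities at once
theorem joinEvens_filt (tog drop : Char) (s : List Char) :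
    ((pvEvens ((pvSplitc tog s).1 :: (pvSplitc tog s).2)).map (fun l => l.filter (fun d => d ≠ drop))).flatten
        = pvFilt tog drop false s ∧
    ((pvOdds ((pvSplitc tog s).1 :: (pvSplitc tog s).2)).map (fun l => l.filter (fun d => d ≠ drop))).flatten
        = pvFilt tog drop true s := by
  induction s with
  | nil => simp [pvSplitc, pvEvens, pvOdds, pvFilt]
  | cons d t ih =>
    obtain ⟨ihE, ihO⟩ := ih
    rw [pvEvens_cons, List.map_cons, List.flatten_cons] at ihE
    simp only [ne_eq] at ihE ihO
    by_cases hd : d = tog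
    · subst hd
      refine ⟨?_, ?_⟩
      · simp only [pvSplitc, eq_self_iff_true, if_true]
        rw [pvEvens_cons]
        simp only [List.map_cons, List.flatten_cons, List.filter_nil, List.nil_append, ne_eq]
        rw [ihO]
        simp [pvFilt]
      · simp only [pvSplitc, eq_self_iff_true, if_true, pvOdds]
        rw [pvEvens_cons, List.map_cons, List.flatten_cons]
        simp only [ne_eq]
        rw [ihE]
        simp [pvFilt]
    · simp only [pvOdds] at ihO
      refine ⟨?_, ?_⟩
      · simp only [pvSplitc, if_neg hd]
        rw [pvEvens_cons]
        simp only [List.map_cons, List.flatten_cons, List.filter_cons, ne_eq]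
        by_cases hdrop : d = drop
        · subst hdrop
          simp only [not_true_eq_false, decide_false, if_neg Bool.false_ne_true]
          rw [ihE]
          simp [pvFilt, hd]
        · simp only [hdrop, not_false_eq_true, decide_true, if_true, List.cons_append]
          rw [ihE]
          simp [pvFilt, hd, hdrop]
      · simp only [pvSplitc, if_neg hd, pvOdds]
        rw [ihO]
        simp [pvFilt, hd]

-- B's whole pipeline (one mode) equals pvFilt from flag=false
theorem altB_filt (tog drop : Char) (s : List Char) :
    (PySem.Chars.join []
      ((PySem.List.pyRange 0 (PySem.Chars.splitOn s [tog]).length 2).map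
        (fun i => PySem.Chars.replace ((PySem.List.pyGet? (PySem.Chars.splitOn s [tog]) i).getD []) [drop] [])))
      = pvFilt tog drop false s := by
  rw [join_nil_flatten]
  have hparts : PySem.Chars.splitOn s [tog] = (pvSplitc tog s).1 :: (pvSplitc tog s).2 :=
    splitOn_single tog s
  rw [hparts]
  rw [pyRange_two ((pvSplitc tog s).1 :: (pvSplitc tog s).2).length, List.map_map]
  have hmap : ∀ parts : List (List Char),
      (List.range ((parts.length + 1) / 2)).map
        ((fun i => PySem.Chars.replace ((PySem.List.pyGet? parts i).getD []) [drop] []) ∘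
          (fun k => ((2 * k : Nat) : Int)))
      = (pvEvens parts).map (fun l => l.filter (fun d => d ≠ drop)) := by
    intro parts
    rw [← range_map_evens parts [], List.map_map]
    apply List.map_congr_left
    intro k _
    simp only [Function.comp_apply, replace_single]
    rw [PySem.List.pyGet?_natCast]
    simp [List.getD]
  rw [hmap]
  exact (joinEvens_filt tog drop s).1

-- ===== VERDICT (by name: the statement is the Claim_ definition above) =====
theorem bracket_filter_spec : Claim_equal_bracket_filter := by
  intro sentence mode _ hpre
  unfold Spec_bracket_filter bracket_filter bracket_filter_alt
  rcases hpre with h | h <;> subst h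
  · simp only [beq_self_eq_true, if_true, String.reduceBEq, Bool.false_eq_true, if_false]
    rw [altB_filt '(' ')' sentence.toList, foldA_pron sentence.toList false []]
    simp
  · simp only [beq_self_eq_true, if_true, String.reduceBEq, Bool.false_eq_true, if_false]
    rw [altB_filt ')' '(' sentence.toList, foldA_spell sentence.toList true []]
    simp
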